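-- pv_equiv track=rewrite | github.com/boknowswiki/mytraning | lintcode/python/0799_backpack_VIII.py | backPackVIII
-- ===== SOURCE A (Python) =====
-- def backPackVIII(n, value, amount):
--     # write your code here
--     # dp[i][j] means for first ith coins it can get j value
--     # dp[i][j] = dp[i-1][j-k*value[i-1]], 0<=k<=amount[i-1]
--     # dp[0][j] = False, dp[i][0] = True
--     # ret += dp[m][j], 1<=j<=n
--
--     m = len(value)
--
--     dp = [0] *(n+1)
--     dp[0] = 1
--     ret = 0
--
--     for i in range(m):
--         cnt = [0 for x in range(n+1)]
--         for j in range(value[i], n+1):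
--             if dp[j] == 0 and dp[j-value[i]] == 1 and cnt[j-value[i]] < amount[i]:
--                 dp[j] = 1
--                 ret += 1
--                 cnt[j] = cnt[j-value[i]]+1
--
--     return ret
-- ===== SOURCE B (Python) =====
-- def backPackVIII(n, value, amount):
--     # Layered reachability by residue classes with a sliding "gap" counter,
--     # separated from the final count (same O(m*n) cost, different algorithm).
--     reach = [False] * (n + 1)
--     reach[0] = True
--     for v, a in zip(value, amount):
--         if v <= 0 or a <= 0:
--             continue  # such a coin can never mark a new value (matches A)
--         nxt = [False] * (n + 1)
--         for r in range(min(v, n + 1)):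
--             gap = a + 1  # steps since the last reachable position in this chain
--             for j in range(r, n + 1, v):
--                 if reach[j]:
--                     gap = 0
--                 else:
--                     gap += 1
--                 nxt[j] = gap <= a
--         reach = nxt
--     return sum(reach[1:])
-- ===== Notes on version B (the rewrite author's own statement) =====
-- stated objective: alternative
-- what changed: Per-coin reachability is recomputed into a fresh boolean layer by walking each residue class mod value[i] with a sliding gap counter (distance to the last reachable position), then the answer is one final count of reachable values 1..n, instead of A's single forward pass that mutates dp in place with a cnt array and increments ret at every flip.
-- outside the precondition, e.g. on backPackVIII(2, [-1], [1]): A returns 1, B returns 0; on backPackVIII(3, [2, -1], [1, 1]): A returns 3, B returns 1; on backPackVIII(2, [-2], [1]): A raises IndexError, B returns 0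
import Mathlib
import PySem

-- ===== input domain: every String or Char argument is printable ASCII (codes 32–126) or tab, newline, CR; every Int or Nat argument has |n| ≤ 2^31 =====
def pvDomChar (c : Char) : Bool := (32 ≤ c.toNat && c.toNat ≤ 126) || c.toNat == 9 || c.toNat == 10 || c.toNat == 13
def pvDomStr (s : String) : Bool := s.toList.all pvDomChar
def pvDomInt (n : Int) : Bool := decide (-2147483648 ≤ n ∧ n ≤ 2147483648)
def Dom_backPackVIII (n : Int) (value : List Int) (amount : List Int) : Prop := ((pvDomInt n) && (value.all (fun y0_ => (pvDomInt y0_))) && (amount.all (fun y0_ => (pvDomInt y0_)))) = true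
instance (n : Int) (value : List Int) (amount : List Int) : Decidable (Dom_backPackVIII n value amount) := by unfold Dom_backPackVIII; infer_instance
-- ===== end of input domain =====

-- B recomputes each coin's reachability into a fresh boolean layer per residue class (sliding
-- gap counter) and counts reachable values 1..n once at the end, instead of A's in-place
-- forward dp/cnt pass that increments ret at every flip; same cost, different algorithm.


-- ===== PORT A =====
-- A-side helpers: Python list indexing / assignment on arrays (Python lists are arrays),
-- index semantics exactly PySem.List.pyIdx?; then the inner-loop and per-coin bodies of A.
def aGet {α : Type} (xs : Array α) (i : Int) (d : α) : α :=
  match PySem.List.pyIdx? xs.size i with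
  | some k => xs.getD k d
  | none => d

def aSet {α : Type} (xs : Array α) (i : Int) (v : α) : Array α :=
  match PySem.List.pyIdx? xs.size i with
  | some k => xs.setIfInBounds k v
  | none => xs

def stepA (v a : Int) (st : Array Int × Array Int × Int) (j : Int) :
    Array Int × Array Int × Int :=
  if aGet st.1 j 0 = 0 ∧ aGet st.1 (j - v) 0 = 1 ∧ aGet st.2.1 (j - v) 0 < a then
    (aSet st.1 j 1, aSet st.2.1 j (aGet st.2.1 (j - v) 0 + 1), st.2.2 + 1)
  else st

def coinP (n : Int) (st : Array Int × Int) (vi ai : Int) : Array Int × Int :=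
  let cnt := ((PySem.List.pyRange 0 (n + 1) 1).map (fun _ => (0 : Int))).toArray
  let r := (PySem.List.pyRange vi (n + 1) 1).foldl (stepA vi ai) (st.1, cnt, st.2)
  (r.1, r.2.2)

def backPackVIII (n : Int) (value : List Int) (amount : List Int) : Int :=
  let m : Int := value.length
  let dp := aSet (List.replicate (n + 1).toNat (0 : Int)).toArray 0 1
  ((PySem.List.pyRange 0 m 1).foldl
      (fun st i => coinP n st (PySem.List.pyGetD value i 0) (PySem.List.pyGetD amount i 0))
      (dp, 0)).2

-- ===== PORT B =====
-- B-side helpers: the chain-step, per-residue and per-coin bodies of B (arrays as above).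
def stepB (reach : Array Bool) (a : Int) (st : Array Bool × Int) (j : Int) :
    Array Bool × Int :=
  let gap := if aGet reach j false then (0 : Int) else st.2 + 1
  (aSet st.1 j (decide (gap ≤ a)), gap)

def resB (n : Int) (reach : Array Bool) (v a : Int) (nxt : Array Bool) (r : Int) :
    Array Bool :=
  ((PySem.List.pyRange r (n + 1) v).foldl (stepB reach a) (nxt, a + 1)).1

def coinB (n : Int) (reach : Array Bool) (va : Int × Int) : Array Bool :=
  if va.1 ≤ 0 ∨ va.2 ≤ 0 then reach
  else (PySem.List.pyRange 0 (min va.1 (n + 1)) 1).foldl (resB n reach va.1 va.2)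
        (List.replicate (n + 1).toNat false).toArray

def backPackVIII_alt (n : Int) (value : List Int) (amount : List Int) : Int :=
  let reach := aSet (List.replicate (n + 1).toNat false).toArray 0 true
  let fin := (value.zip amount).foldl (coinB n) reach
  (PySem.List.slice fin.toList (some 1) none).foldl
    (fun s b => s + (if b then (1 : Int) else 0)) 0

-- ===== PRECONDITION & SPEC =====
-- Pre_ excludes n < 0 and amount shorter than value (A raises IndexError there), and negative
-- coin values, on which A's dp indexing is ill-formed: depending on dp's state it either raises
-- IndexError or reads dp through Python negative-index wraparound, producing an accidental result.
def Pre_backPackVIII (n : Int) (value : List Int) (amount : List Int) : Prop :=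
  0 ≤ n ∧ (∀ v ∈ value, 0 ≤ v) ∧ value.length ≤ amount.length
instance (n : Int) (value : List Int) (amount : List Int) : Decidable (Pre_backPackVIII n value amount) := by unfold Pre_backPackVIII; infer_instance

def pvWitness_backPackVIII : Int × List Int × List Int := (5, ([1, 2], [2, 1]))

def Spec_backPackVIII (n : Int) (value : List Int) (amount : List Int) (out : Int) : Prop := out = backPackVIII_alt n value amount
instance (n : Int) (value : List Int) (amount : List Int) (out : Int) : Decidable (Spec_backPackVIII n value amount out) := by unfold Spec_backPackVIII; infer_instance

-- ===== CLAIM (what is proved, stated in full; the proofs are below) =====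
def Claim_equal_backPackVIII : Prop := ∀ (n : Int) (value : List Int) (amount : List Int), Dom_backPackVIII n value amount → Pre_backPackVIII n value amount → Spec_backPackVIII n value amount (backPackVIII n value amount)

-- ===== LEMMAS AND PROOFS =====

-- List-level models of the two ports (same code over List; the ports over Array are bridged
-- to these below, and all invariant proofs are carried out on the List level).
def stepAL (v a : Int) (st : List Int × List Int × Int) (j : Int) : List Int × List Int × Int :=
  if PySem.List.pyGetD st.1 j 0 = 0 ∧ PySem.List.pyGetD st.1 (j - v) 0 = 1 ∧
     PySem.List.pyGetD st.2.1 (j - v) 0 < a then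
    (PySem.List.pySetD st.1 j 1,
     PySem.List.pySetD st.2.1 j (PySem.List.pyGetD st.2.1 (j - v) 0 + 1),
     st.2.2 + 1)
  else st

def coinPL (n : Int) (st : List Int × Int) (vi ai : Int) : List Int × Int :=
  let cnt := (PySem.List.pyRange 0 (n + 1) 1).map (fun _ => (0 : Int))
  let r := (PySem.List.pyRange vi (n + 1) 1).foldl (stepAL vi ai) (st.1, cnt, st.2)
  (r.1, r.2.2)

def stepBL (reach : List Bool) (a : Int) (st : List Bool × Int) (j : Int) : List Bool × Int :=
  let gap := if PySem.List.pyGetD reach j false then (0 : Int) else st.2 + 1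
  (PySem.List.pySetD st.1 j (decide (gap ≤ a)), gap)

def resBL (n : Int) (reach : List Bool) (v a : Int) (nxt : List Bool) (r : Int) : List Bool :=
  ((PySem.List.pyRange r (n + 1) v).foldl (stepBL reach a) (nxt, a + 1)).1

def coinBL (n : Int) (reach : List Bool) (va : Int × Int) : List Bool :=
  if va.1 ≤ 0 ∨ va.2 ≤ 0 then reach
  else (PySem.List.pyRange 0 (min va.1 (n + 1)) 1).foldl (resBL n reach va.1 va.2)
        (List.replicate (n + 1).toNat false)

-- bridges: the Array ports project to the List models through toList
theorem pyIdx?_lt (n : Nat) (i : Int) (k : Nat) (h : PySem.List.pyIdx? n i = some k) : k < n := by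
  unfold PySem.List.pyIdx? at h
  split_ifs at h <;> simp_all <;> omega

theorem aGet_toList {α : Type} (xs : Array α) (i : Int) (d : α) :
    aGet xs i d = PySem.List.pyGetD xs.toList i d := by
  unfold aGet PySem.List.pyGetD PySem.List.pyGet?
  rw [Array.length_toList]
  cases h : PySem.List.pyIdx? xs.size i with
  | none => rfl
  | some k =>
    have hk := pyIdx?_lt _ _ _ h
    simp [Array.getD, hk, Array.getElem?_toList, Array.getElem?_eq_getElem hk]

theorem aSet_toList {α : Type} (xs : Array α) (i : Int) (v : α) :
    (aSet xs i v).toList = PySem.List.pySetD xs.toList i v := by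
  unfold aSet PySem.List.pySetD PySem.List.pySet?
  rw [Array.length_toList]
  cases h : PySem.List.pyIdx? xs.size i with
  | none => rfl
  | some k =>
    have hk := pyIdx?_lt _ _ _ h
    simp [Array.setIfInBounds, hk, Array.toList_set]

theorem stepA_bridge (v a : Int) (st : Array Int × Array Int × Int) (j : Int) :
    ((stepA v a st j).1.toList, (stepA v a st j).2.1.toList, (stepA v a st j).2.2)
      = stepAL v a (st.1.toList, st.2.1.toList, st.2.2) j := by
  unfold stepA stepAL
  simp only [aGet_toList]
  split_ifs with h
  · simp [aSet_toList, aGet_toList]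
  · rfl

theorem foldlA_bridge (v a : Int) (l : List Int) :
    ∀ (st : Array Int × Array Int × Int),
    ((l.foldl (stepA v a) st).1.toList, (l.foldl (stepA v a) st).2.1.toList,
      (l.foldl (stepA v a) st).2.2)
      = l.foldl (stepAL v a) (st.1.toList, st.2.1.toList, st.2.2) := by
  induction l with
  | nil => intro st; rfl
  | cons x xs ih =>
    intro st
    rw [List.foldl_cons, List.foldl_cons, ← stepA_bridge, ih]

theorem coinP_bridge (n : Int) (st : Array Int × Int) (vi ai : Int) :
    ((coinP n st vi ai).1.toList, (coinP n st vi ai).2)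
      = coinPL n (st.1.toList, st.2) vi ai := by
  simp only [coinP, coinPL]
  have h := foldlA_bridge vi ai (PySem.List.pyRange vi (n + 1) 1)
    (st.1, ((PySem.List.pyRange 0 (n + 1) 1).map (fun _ => (0 : Int))).toArray, st.2)
  dsimp only at h
  rw [List.toList_toArray] at h
  rw [← h]

theorem outerA_bridge (n : Int) (value amount : List Int) (l : List Int) :
    ∀ (st : Array Int × Int),
    (((l.foldl (fun st i => coinP n st (PySem.List.pyGetD value i 0)
        (PySem.List.pyGetD amount i 0)) st).1.toList),
      (l.foldl (fun st i => coinP n st (PySem.List.pyGetD value i 0)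
        (PySem.List.pyGetD amount i 0)) st).2)
      = l.foldl (fun st i => coinPL n st (PySem.List.pyGetD value i 0)
          (PySem.List.pyGetD amount i 0)) (st.1.toList, st.2) := by
  induction l with
  | nil => intro st; rfl
  | cons x xs ih =>
    intro st
    rw [List.foldl_cons, List.foldl_cons, ← coinP_bridge, ih]

theorem stepB_bridge (reach : Array Bool) (a : Int) (st : Array Bool × Int) (j : Int) :
    ((stepB reach a st j).1.toList, (stepB reach a st j).2)
      = stepBL reach.toList a (st.1.toList, st.2) j := by
  simp only [stepB, stepBL, aGet_toList]
  rw [aSet_toList]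

theorem foldlB_bridge (reach : Array Bool) (a : Int) (l : List Int) :
    ∀ (st : Array Bool × Int),
    ((l.foldl (stepB reach a) st).1.toList, (l.foldl (stepB reach a) st).2)
      = l.foldl (stepBL reach.toList a) (st.1.toList, st.2) := by
  induction l with
  | nil => intro st; rfl
  | cons x xs ih =>
    intro st
    rw [List.foldl_cons, List.foldl_cons, ← stepB_bridge, ih]

theorem resB_bridge (n : Int) (reach : Array Bool) (v a : Int) (nxt : Array Bool) (r : Int) :
    (resB n reach v a nxt r).toList = resBL n reach.toList v a nxt.toList r := by
  unfold resB resBL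
  have h := foldlB_bridge reach a (PySem.List.pyRange r (n + 1) v) (nxt, a + 1)
  exact congrArg Prod.fst h

theorem coinB_bridge (n : Int) (reach : Array Bool) (va : Int × Int) :
    (coinB n reach va).toList = coinBL n reach.toList va := by
  unfold coinB coinBL
  split_ifs with h
  · rfl
  · have hgen : ∀ (l : List Int) (init : Array Bool),
        (l.foldl (resB n reach va.1 va.2) init).toList
          = l.foldl (resBL n reach.toList va.1 va.2) init.toList := by
      intro l
      induction l with
      | nil => intro init; rfl
      | cons x xs ih =>
        intro init
        rw [List.foldl_cons, List.foldl_cons, ih (resB n reach va.1 va.2 init x), resB_bridge]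
    rw [hgen, List.toList_toArray]

theorem zipB_bridge (n : Int) (pairs : List (Int × Int)) :
    ∀ (reach : Array Bool),
    (pairs.foldl (coinB n) reach).toList = pairs.foldl (coinBL n) reach.toList := by
  induction pairs with
  | nil => intro reach; rfl
  | cons p ps ih =>
    intro reach
    rw [List.foldl_cons, List.foldl_cons, ih, coinB_bridge]



-- Mathematical model shared by both proofs: `gapF g v j` = distance (in v-steps) from j back to
-- the nearest g-reachable position in its chain, `nrF` = reachability after adding ≤ a coins of
-- value v, `cntS` = the value A's cnt array holds, `layerG`/`layersG` = per-coin/all-coins layers.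
def gapF (g : Nat → Bool) (v j : Nat) : Option Nat :=
  if g j then some 0
  else if _h : j < v ∨ v = 0 then none
  else (gapF g v (j - v)).map (· + 1)
termination_by j
decreasing_by omega

def nrF (g : Nat → Bool) (v : Nat) (a : Int) (j : Nat) : Bool :=
  match gapF g v j with
  | some k => decide ((k : Int) ≤ a)
  | none => false

def cntS (g : Nat → Bool) (v : Nat) (a : Int) (j : Nat) : Int :=
  match gapF g v j with
  | some k => if (k : Int) ≤ a ∧ g j = false then (k : Int) else 0
  | none => 0

def layerG (g : Nat → Bool) (v a : Int) : Nat → Bool :=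
  fun j => if 1 ≤ v ∧ 1 ≤ a then nrF g v.toNat a j else g j

def layersG (g : Nat → Bool) (pairs : List (Int × Int)) : Nat → Bool :=
  pairs.foldl (fun g p => layerG g p.1 p.2) g

theorem getD_set' {α : Type} (xs : List α) (t j : Nat) (v d : α) (ht : t < xs.length) :
    (xs.set t v).getD j d = if j = t then v else xs.getD j d := by
  by_cases hj : j = t
  · subst hj; simp [List.getD_eq_getElem?_getD, ht]
  · simp [List.getD_eq_getElem?_getD, List.getElem?_set_ne (by omega : t ≠ j), hj]

theorem getD_replicate {α : Type} (N j : Nat) (a : α) : (List.replicate N a).getD j a = a := by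
  rcases lt_or_ge j N with h | h
  · have hlen : j < (List.replicate N a).length := by simpa using h
    simp [List.getD_eq_getElem?_getD, List.getElem?_eq_getElem hlen]
  · have hlen : (List.replicate N a).length ≤ j := by simpa using h
    simp [List.getD_eq_getElem?_getD, List.getElem?_eq_none hlen]

theorem pyGetD_zero_map (l : List Int) (i : Int) :
    PySem.List.pyGetD (l.map (fun _ => (0 : Int))) i 0 = 0 := by
  have := PySem.List.pyGetD_map (f := fun _ : Int => (0 : Int)) (xs := l) (i := i) (d := (0 : Int))
  simpa using this

theorem gapF_congr (g g' : Nat → Bool) (v j : Nat) (h : ∀ x, x ≤ j → g x = g' x) :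
    gapF g v j = gapF g' v j := by
  induction j using Nat.strong_induction_on with
  | _ j ih =>
    conv_lhs => rw [gapF]
    conv_rhs => rw [gapF]
    rw [← h j le_rfl]
    cases hgj : g j with
    | true => simp
    | false =>
      simp only [Bool.false_eq_true, if_false]
      by_cases hd : j < v ∨ v = 0
      · simp [hd]
      · rw [dif_neg hd, dif_neg hd, ih (j - v) (by omega) (fun x hx => h x (by omega))]

theorem nrF_congr (g g' : Nat → Bool) (v : Nat) (a : Int) (j : Nat)
    (h : ∀ x, x ≤ j → g x = g' x) : nrF g v a j = nrF g' v a j := by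
  unfold nrF; rw [gapF_congr g g' v j h]

theorem nrF_of_g (g : Nat → Bool) (v : Nat) (a : Int) (ha : 1 ≤ a) (j : Nat)
    (hg : g j = true) : nrF g v a j = true := by
  unfold nrF; rw [gapF]; rw [hg]; simp; omega

theorem gapF_of_lt (g : Nat → Bool) (v j : Nat) (hj : j < v ∨ v = 0) :
    gapF g v j = if g j then some 0 else none := by
  rw [gapF]; by_cases hg : g j <;> simp [hg, hj]

theorem cntS_eq_zero_of_nr_false (g : Nat → Bool) (v : Nat) (a : Int) (j : Nat)
    (h : nrF g v a j = false) : cntS g v a j = 0 := by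
  unfold nrF at h; unfold cntS
  cases hg : gapF g v j with
  | none => rfl
  | some k =>
    rw [hg] at h; simp only [decide_eq_false_iff_not] at h
    show (if (k : Int) ≤ a ∧ g j = false then (k : Int) else 0) = 0
    rw [if_neg (by intro hc; exact h hc.1)]

theorem foldl_fixed {α β : Type} (f : β → α → β) (init : β) (l : List α)
    (h : ∀ x ∈ l, f init x = init) : l.foldl f init = init := by
  induction l with
  | nil => rfl
  | cons x xs ih => simp only [List.foldl_cons, h x (by simp)]; exact ih fun y hy => h y (by simp [hy])

theorem countP_split (l : List Nat) (p q : Nat → Bool) (h : ∀ x ∈ l, q x = true → p x = true) :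
    l.countP p = l.countP q + l.countP (fun x => p x && ! q x) := by
  induction l with
  | nil => rfl
  | cons x xs ih =>
    simp only [List.countP_cons]
    have := ih (fun y hy => h y (by simp [hy]))
    by_cases hq : q x = true
    · have hp := h x (by simp) hq; simp [hp, hq]; omega
    · simp at hq; simp [hq]; by_cases hp : p x = true <;> simp [hp] <;> omega

theorem eq_map_range {α : Type} (xs : List α) (d : α) (N : Nat) (f : Nat → α)
    (hl : xs.length = N) (h : ∀ j, j < N → xs.getD j d = f j) : xs = (List.range N).map f := by
  apply List.ext_getElem
  · simp [hl]
  · intro i h1 h2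
    have hx := h i (by omega)
    rw [List.getD_eq_getElem?_getD, List.getElem?_eq_getElem h1] at hx
    simpa using hx

-- the chain step characterisation: one forward step of A's recurrence in terms of nrF/cntS
theorem chain_step (g : Nat → Bool) (v : Nat) (a : Int) (hv : 1 ≤ v) (t : Nat) (ht : v ≤ t)
    (hgt : g t = false) :
    (nrF g v a t = (nrF g v a (t - v) && decide (cntS g v a (t - v) < a)))
    ∧ (nrF g v a t = true → cntS g v a t = cntS g v a (t - v) + 1) := by
  have hg : gapF g v t = (gapF g v (t - v)).map (· + 1) := by
    rw [gapF]; simp only [hgt, Bool.false_eq_true, if_false]; rw [dif_neg (by omega)]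
  cases hpre : gapF g v (t - v) with
  | none =>
    refine ⟨?_, ?_⟩
    · unfold nrF; rw [hg, hpre]; rfl
    · intro hnt; unfold nrF at hnt; rw [hg, hpre] at hnt; exact absurd hnt (by simp)
  | some k =>
    have hknn : ∀ m : Nat, ((m + 1 : Nat) : Int) = (m : Int) + 1 := by intro m; push_cast; ring
    by_cases hgtv : g (t - v) = true
    · have h0 : gapF g v (t - v) = some 0 := by rw [gapF]; simp [hgtv]
      rw [hpre] at h0; injection h0 with hk; subst hk
      refine ⟨?_, ?_⟩
      · unfold nrF cntS; rw [hg, hpre]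
        simp only [Option.map_some, hgtv]
        by_cases h1 : (1 : Int) ≤ a
        · have h2 : (0 : Int) ≤ a := by omega
          have h3 : (0 : Int) < a := by omega
          simp [h1, h2, h3, hknn 0]
        · have h3 : ¬(0 : Int) < a := by omega
          simp [h1, h3, hknn 0]
      · intro hnt
        unfold nrF at hnt; rw [hg, hpre] at hnt
        simp only [Option.map_some, decide_eq_true_eq] at hnt
        unfold cntS; rw [hg, hpre]
        rw [hknn 0] at hnt
        simp [hgtv, hgt, hknn 0]
        omega
    · have hgtv' : g (t - v) = false := by simpa using hgtv
      refine ⟨?_, ?_⟩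
      · unfold nrF cntS; rw [hg, hpre]
        simp only [Option.map_some, hgtv', and_true]
        by_cases h1 : (k : Int) ≤ a
        · by_cases h2 : (k : Int) < a
          · simp [h1, h2]
          · have h3 : ¬((k + 1 : Nat) : Int) ≤ a := by rw [hknn]; omega
            simp [h1, h2]
        · have h3 : ¬((k + 1 : Nat) : Int) ≤ a := by rw [hknn]; omega
          simp [h1]; omega
      · intro hnt
        unfold nrF at hnt; rw [hg, hpre] at hnt
        simp only [Option.map_some, decide_eq_true_eq] at hnt
        rw [hknn] at hnt
        have hka : (k : Int) ≤ a := by omega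
        unfold cntS; rw [hg, hpre]
        simp only [Option.map_some, hgtv', hgt, and_true]
        rw [hknn]
        rw [if_pos (by omega), if_pos hka]

-- A's inner loop, processed prefix of length c (indices v, v+1, …, v+c-1)
def gOfI (dp : List Int) : Nat → Bool := fun j => dp.getD j 0 == 1

def AStA (v a : Int) (dp cnt0 : List Int) (ret : Int) (c : Nat) : List Int × List Int × Int :=
  ((List.range c).map (fun k : Nat => v + (k : Int))).foldl (stepAL v a) (dp, cnt0, ret)

theorem AStA_succ (v a : Int) (dp cnt0 : List Int) (ret : Int) (c : Nat) :
    AStA v a dp cnt0 ret (c + 1) = stepAL v a (AStA v a dp cnt0 ret c) (v + (c : Int)) := by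
  unfold AStA; rw [List.range_succ, List.map_append, List.foldl_append]; rfl

theorem passA (N : Nat) (v a : Int) (hv : 1 ≤ v) (ha : 1 ≤ a)
    (dp : List Int) (hlen : dp.length = N)
    (h01 : ∀ j : Nat, dp.getD j 0 = 0 ∨ dp.getD j 0 = 1) (ret : Int) (cnt0 : List Int)
    (hc0len : cnt0.length = N) (hc0 : ∀ j : Nat, cnt0.getD j 0 = 0) :
    ∀ (c : Nat), v.toNat + c ≤ N →
    (AStA v a dp cnt0 ret c).1.length = N ∧ (AStA v a dp cnt0 ret c).2.1.length = N ∧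
    (∀ j : Nat, v.toNat + c ≤ j →
      (AStA v a dp cnt0 ret c).1.getD j 0 = dp.getD j 0 ∧
      (AStA v a dp cnt0 ret c).2.1.getD j 0 = 0) ∧
    (∀ j : Nat, j < v.toNat + c →
      (AStA v a dp cnt0 ret c).1.getD j 0 = (if nrF (gOfI dp) v.toNat a j then 1 else 0) ∧
      (AStA v a dp cnt0 ret c).2.1.getD j 0 = cntS (gOfI dp) v.toNat a j) ∧
    (AStA v a dp cnt0 ret c).2.2
      = ret + ((List.range (v.toNat + c)).countP
          (fun j => nrF (gOfI dp) v.toNat a j && ! gOfI dp j) : Int) := by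
  have hv1 : 1 ≤ v.toNat := by omega
  intro c
  induction c with
  | zero =>
    intro hcN
    have hA : AStA v a dp cnt0 ret 0 = (dp, cnt0, ret) := rfl
    rw [hA]
    refine ⟨hlen, hc0len, fun j _ => ⟨rfl, hc0 j⟩, ?_, ?_⟩
    · intro j hj
      have hlt : j < v.toNat ∨ v.toNat = 0 := by omega
      have hgap := gapF_of_lt (gOfI dp) v.toNat j hlt
      rcases h01 j with h | h
      · have hgj : gOfI dp j = false := by unfold gOfI; rw [h]; rfl
        have : nrF (gOfI dp) v.toNat a j = false := by unfold nrF; rw [hgap, hgj]; rfl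
        refine ⟨by rw [this]; simp only [Bool.false_eq_true, if_false]; exact h, ?_⟩
        rw [hc0 j, cntS_eq_zero_of_nr_false _ _ _ _ this]
      · have hgj : gOfI dp j = true := by unfold gOfI; rw [h]; rfl
        have : nrF (gOfI dp) v.toNat a j = true := nrF_of_g _ _ _ ha _ hgj
        refine ⟨by rw [this, if_pos rfl]; exact h, ?_⟩
        rw [hc0 j]
        unfold cntS; rw [hgap, hgj]; simp
    · have : (List.range v.toNat).countP
          (fun j => nrF (gOfI dp) v.toNat a j && ! gOfI dp j) = 0 := by
        apply List.countP_eq_zero.mpr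
        intro j hj
        have hjv : j < v.toNat := List.mem_range.mp hj
        cases hgj : gOfI dp j with
        | true => simp
        | false =>
          have : nrF (gOfI dp) v.toNat a j = false := by
            unfold nrF; rw [gapF_of_lt _ _ _ (Or.inl hjv), hgj]; rfl
          simp [this]
      simp only [Nat.add_zero]
      rw [this]; simp
  | succ c ihc =>
    intro hcN
    obtain ⟨hL1, hL2, hun, hpr, hret⟩ := ihc (by omega)
    have hvc : v + (c : Int) = ((v.toNat + c : Nat) : Int) := by push_cast; omega
    have htN : v.toNat + c < N := by omega
    have hclt : c < v.toNat + c := by omega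
    have e1 : PySem.List.pyGetD (AStA v a dp cnt0 ret c).1 (v + (c : Int)) 0
        = dp.getD (v.toNat + c) 0 := by
      rw [hvc, PySem.List.pyGetD_natCast]; exact (hun _ le_rfl).1
    have esub : v + (c : Int) - v = ((c : Nat) : Int) := by ring
    have e2 : PySem.List.pyGetD (AStA v a dp cnt0 ret c).1 (v + (c : Int) - v) 0
        = (if nrF (gOfI dp) v.toNat a c then 1 else 0) := by
      rw [esub, PySem.List.pyGetD_natCast]; exact (hpr c hclt).1
    have e3 : PySem.List.pyGetD (AStA v a dp cnt0 ret c).2.1 (v + (c : Int) - v) 0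
        = cntS (gOfI dp) v.toNat a c := by
      rw [esub, PySem.List.pyGetD_natCast]; exact (hpr c hclt).2
    have hsub : v.toNat + c - v.toNat = c := by omega
    have hcount : (List.range (v.toNat + c + 1)).countP
          (fun j => nrF (gOfI dp) v.toNat a j && ! gOfI dp j)
        = (List.range (v.toNat + c)).countP
            (fun j => nrF (gOfI dp) v.toNat a j && ! gOfI dp j)
          + (if nrF (gOfI dp) v.toNat a (v.toNat + c) && ! gOfI dp (v.toNat + c) then 1 else 0) := by
      rw [List.range_succ, List.countP_append]
      simp [List.countP_cons]
    rw [AStA_succ]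
    rcases h01 (v.toNat + c) with h0 | h1
    · -- dp[t] originally 0, g t = false
      have hgt : gOfI dp (v.toNat + c) = false := by unfold gOfI; rw [h0]; rfl
      have hcs := chain_step (gOfI dp) v.toNat a hv1 (v.toNat + c) (by omega) hgt
      rw [hsub] at hcs
      by_cases hC : nrF (gOfI dp) v.toNat a c = true ∧ cntS (gOfI dp) v.toNat a c < a
      · -- condition true: write
        have hnrt : nrF (gOfI dp) v.toNat a (v.toNat + c) = true := by
          rw [hcs.1, hC.1]; simp [hC.2]
        have hcond : PySem.List.pyGetD (AStA v a dp cnt0 ret c).1 (v + (c : Int)) 0 = 0 ∧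
            PySem.List.pyGetD (AStA v a dp cnt0 ret c).1 (v + (c : Int) - v) 0 = 1 ∧
            PySem.List.pyGetD (AStA v a dp cnt0 ret c).2.1 (v + (c : Int) - v) 0 < a := by
          refine ⟨by rw [e1, h0], by rw [e2, hC.1]; simp, by rw [e3]; exact hC.2⟩
        unfold stepAL
        rw [if_pos hcond]
        have hset1 : PySem.List.pySetD (AStA v a dp cnt0 ret c).1 (v + (c : Int)) 1
            = (AStA v a dp cnt0 ret c).1.set (v.toNat + c) 1 := by
          rw [hvc, PySem.List.pySetD_natCast]
        have hset2 : PySem.List.pySetD (AStA v a dp cnt0 ret c).2.1 (v + (c : Int))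
              (PySem.List.pyGetD (AStA v a dp cnt0 ret c).2.1 (v + (c : Int) - v) 0 + 1)
            = (AStA v a dp cnt0 ret c).2.1.set (v.toNat + c) (cntS (gOfI dp) v.toNat a c + 1) := by
          rw [e3, hvc, PySem.List.pySetD_natCast]
        refine ⟨by rw [hset1]; simp [hL1], by rw [hset2]; simp [hL2], ?_, ?_, ?_⟩
        · intro j hj
          constructor
          · rw [hset1, getD_set' _ _ _ _ _ (by omega), if_neg (by omega)]
            exact (hun j (by omega)).1
          · rw [hset2, getD_set' _ _ _ _ _ (by omega), if_neg (by omega)]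
            exact (hun j (by omega)).2
        · intro j hj
          by_cases hje : j = v.toNat + c
          · subst hje
            constructor
            · rw [hset1, getD_set' _ _ _ _ _ (by omega), if_pos rfl, hnrt, if_pos rfl]
            · rw [hset2, getD_set' _ _ _ _ _ (by omega), if_pos rfl, hcs.2 hnrt]
          · have hjlt : j < v.toNat + c := by omega
            constructor
            · rw [hset1, getD_set' _ _ _ _ _ (by omega), if_neg hje]
              exact (hpr j hjlt).1
            · rw [hset2, getD_set' _ _ _ _ _ (by omega), if_neg hje]
              exact (hpr j hjlt).2
        · rw [show v.toNat + (c + 1) = v.toNat + c + 1 from rfl, hcount, hret]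
          simp [hnrt, hgt]
          ring
      · -- condition false: state unchanged
        have hnrt : nrF (gOfI dp) v.toNat a (v.toNat + c) = false := by
          rw [hcs.1]
          by_cases hb : nrF (gOfI dp) v.toNat a c = true
          · have : ¬ cntS (gOfI dp) v.toNat a c < a := fun hlt => hC ⟨hb, hlt⟩
            simp [this]
          · have hb' : nrF (gOfI dp) v.toNat a c = false := by simpa using hb
            simp [hb']
        have hcond : ¬ (PySem.List.pyGetD (AStA v a dp cnt0 ret c).1 (v + (c : Int)) 0 = 0 ∧
            PySem.List.pyGetD (AStA v a dp cnt0 ret c).1 (v + (c : Int) - v) 0 = 1 ∧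
            PySem.List.pyGetD (AStA v a dp cnt0 ret c).2.1 (v + (c : Int) - v) 0 < a) := by
          rintro ⟨c1, c2, c3⟩
          rw [e2] at c2
          rw [e3] at c3
          have hb : nrF (gOfI dp) v.toNat a c = true := by
            by_contra hb
            simp only [Bool.not_eq_true] at hb
            rw [hb] at c2; simp at c2
          exact hC ⟨hb, c3⟩
        unfold stepAL
        rw [if_neg hcond]
        refine ⟨hL1, hL2, ?_, ?_, ?_⟩
        · intro j hj
          exact hun j (by omega)
        · intro j hj
          by_cases hje : j = v.toNat + c
          · subst hje
            refine ⟨?_, ?_⟩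
            · rw [(hun _ le_rfl).1, hnrt, h0]; rfl
            · rw [(hun _ le_rfl).2, cntS_eq_zero_of_nr_false _ _ _ _ hnrt]
          · exact hpr j (by omega)
        · rw [show v.toNat + (c + 1) = v.toNat + c + 1 from rfl, hcount, hret]
          simp [hnrt]
    · -- dp[t] originally 1, g t = true
      have hgt : gOfI dp (v.toNat + c) = true := by unfold gOfI; rw [h1]; rfl
      have hnrt : nrF (gOfI dp) v.toNat a (v.toNat + c) = true := nrF_of_g _ _ _ ha _ hgt
      have hcond : ¬ (PySem.List.pyGetD (AStA v a dp cnt0 ret c).1 (v + (c : Int)) 0 = 0 ∧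
          PySem.List.pyGetD (AStA v a dp cnt0 ret c).1 (v + (c : Int) - v) 0 = 1 ∧
          PySem.List.pyGetD (AStA v a dp cnt0 ret c).2.1 (v + (c : Int) - v) 0 < a) := by
        rintro ⟨c1, _, _⟩
        rw [e1, h1] at c1
        exact absurd c1 (by norm_num)
      unfold stepAL
      rw [if_neg hcond]
      refine ⟨hL1, hL2, ?_, ?_, ?_⟩
      · intro j hj
        exact hun j (by omega)
      · intro j hj
        by_cases hje : j = v.toNat + c
        · subst hje
          refine ⟨?_, ?_⟩
          · rw [(hun _ le_rfl).1, hnrt, if_pos rfl, h1]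
          · rw [(hun _ le_rfl).2]
            unfold cntS
            cases hgap : gapF (gOfI dp) v.toNat (v.toNat + c) with
            | none => rfl
            | some k => rw [hgt]; simp
        · exact hpr j (by omega)
      · rw [show v.toNat + (c + 1) = v.toNat + c + 1 from rfl, hcount, hret]
        simp [hgt]

-- A's per-coin result, all cases of (v, a)
theorem getD_map_zero {α : Type} (l : List α) (j : Nat) :
    (l.map (fun _ => (0 : Int))).getD j 0 = 0 := by
  rcases lt_or_ge j l.length with h | h
  · have hlen : j < (l.map (fun _ => (0 : Int))).length := by simpa using h
    rw [List.getD_eq_getElem?_getD, List.getElem?_eq_getElem hlen]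
    simp
  · have hlen : (l.map (fun _ => (0 : Int))).length ≤ j := by simpa using h
    rw [List.getD_eq_getElem?_getD, List.getElem?_eq_none hlen]
    rfl

theorem coinA_char (N : Nat) (hN : 1 ≤ N) (n : Int) (hn : (N : Int) = n + 1)
    (v a : Int) (hv : 0 ≤ v) (dp : List Int) (ret : Int) (hlen : dp.length = N)
    (g : Nat → Bool) (hg : ∀ j, j < N → dp.getD j 0 = if g j then 1 else 0) :
    (coinPL n (dp, ret) v a).1.length = N ∧
    (∀ j, j < N → (coinPL n (dp, ret) v a).1.getD j 0 = if layerG g v a j then 1 else 0) ∧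
    (coinPL n (dp, ret) v a).2
      = ret + ((List.range N).countP (fun j => layerG g v a j && ! g j) : Int) := by
  have hgg : ∀ x, x < N → gOfI dp x = g x := by
    intro x hx; unfold gOfI; rw [hg x hx]; cases hgx : g x <;> simp
  have hcnt0len : ((PySem.List.pyRange 0 (n + 1) 1).map (fun _ => (0 : Int))).length = N := by
    simp [PySem.List.length_pyRange_one]; omega
  have hcnt0 : ∀ j : Nat,
      ((PySem.List.pyRange 0 (n + 1) 1).map (fun _ => (0 : Int))).getD j 0 = 0 :=
    fun j => getD_map_zero _ j
  by_cases hva : 1 ≤ v ∧ 1 ≤ a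
  · -- real coin
    have hlay : ∀ j, layerG g v a j = nrF g v.toNat a j := by
      intro j; unfold layerG; rw [if_pos hva]
    have hv1 : 1 ≤ v.toNat := by omega
    by_cases hvN : N ≤ v.toNat
    · -- value too large: empty range, identity
      have hnil : PySem.List.pyRange v (n + 1) 1 = [] :=
        PySem.List.pyRange_one_eq_nil (by omega)
      have hst : coinPL n (dp, ret) v a = (dp, ret) := by
        simp only [coinPL]; rw [hnil]; rfl
      rw [hst]
      refine ⟨hlen, ?_, ?_⟩
      · intro j hj
        have hgap := gapF_of_lt g v.toNat j (by omega)
        rw [hlay j]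
        cases hgj : g j with
        | true =>
          rw [nrF_of_g _ _ _ hva.2 _ hgj, hg j hj, hgj]
        | false =>
          have : nrF g v.toNat a j = false := by unfold nrF; rw [hgap, hgj]; rfl
          rw [this, hg j hj, hgj]
      · have hz : (List.range N).countP (fun j => layerG g v a j && ! g j) = 0 := by
          apply List.countP_eq_zero.mpr
          intro j hj
          have hjN : j < N := List.mem_range.mp hj
          rw [hlay j]
          cases hgj : g j with
          | true => simp
          | false =>
            have : nrF g v.toNat a j = false := by
              unfold nrF; rw [gapF_of_lt g v.toNat j (by omega), hgj]; rfl
            simp [this]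
        rw [hz]; simp
    · -- v.toNat < N
      have h01 : ∀ j : Nat, dp.getD j 0 = 0 ∨ dp.getD j 0 = 1 := by
        intro j
        rcases lt_or_ge j N with hj | hj
        · rw [hg j hj]; cases g j <;> simp
        · left
          have : dp.length ≤ j := by omega
          simp [List.getD_eq_getElem?_getD, List.getElem?_eq_none this]
      have hrange : PySem.List.pyRange v (n + 1) 1
          = (List.range (N - v.toNat)).map (fun k : Nat => v + (k : Int)) := by
        rw [PySem.List.pyRange_one, show (n + 1 - v).toNat = N - v.toNat by omega]
      have hsum : v.toNat + (N - v.toNat) = N := by omega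
      have hpa := passA N v a (by omega) hva.2 dp hlen h01 ret _ hcnt0len hcnt0
        (N - v.toNat) (by omega)
      rw [hsum] at hpa
      obtain ⟨hL1, _, _, hpr, hret⟩ := hpa
      have hst : coinPL n (dp, ret) v a
          = ((AStA v a dp ((PySem.List.pyRange 0 (n + 1) 1).map (fun _ => (0 : Int))) ret
              (N - v.toNat)).1,
             (AStA v a dp ((PySem.List.pyRange 0 (n + 1) 1).map (fun _ => (0 : Int))) ret
              (N - v.toNat)).2.2) := by
        simp only [coinPL, AStA]; rw [hrange]
      rw [hst]
      have hnr : ∀ j, j < N → nrF (gOfI dp) v.toNat a j = nrF g v.toNat a j := by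
        intro j hj
        exact nrF_congr _ _ _ _ _ (fun x hx => hgg x (by omega))
      refine ⟨hL1, ?_, ?_⟩
      · intro j hj
        rw [(hpr j hj).1, hnr j hj, hlay j]
      · rw [hret]
        congr 2
        apply List.countP_congr
        intro j hj
        have hjN : j < N := List.mem_range.mp hj
        rw [hnr j hjN, hgg j hjN, hlay j]
  · -- no-op coin: v = 0 or a ≤ 0
    have hlay : ∀ j, layerG g v a j = g j := by
      intro j; unfold layerG; rw [if_neg hva]
    have hfix : (PySem.List.pyRange v (n + 1) 1).foldl (stepAL v a)
        (dp, (PySem.List.pyRange 0 (n + 1) 1).map (fun _ => (0 : Int)), ret)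
        = (dp, (PySem.List.pyRange 0 (n + 1) 1).map (fun _ => (0 : Int)), ret) := by
      apply foldl_fixed
      intro x hx
      unfold stepAL
      rw [if_neg]
      rintro ⟨c1, c2, c3⟩
      by_cases hv1 : 1 ≤ v
      · -- then a ≤ 0, cnt read is 0
        have ha0 : ¬ 1 ≤ a := fun ha => hva ⟨hv1, ha⟩
        rw [pyGetD_zero_map] at c3
        omega
      · -- v = 0
        have hv0 : v = 0 := by omega
        rw [hv0, sub_zero] at c2
        rw [c1] at c2
        norm_num at c2
    have hst : coinPL n (dp, ret) v a = (dp, ret) := by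
      simp only [coinPL]; rw [hfix]
    rw [hst]
    refine ⟨hlen, fun j hj => by rw [hlay j]; exact hg j hj, ?_⟩
    have hz : (List.range N).countP (fun j => layerG g v a j && ! g j) = 0 := by
      apply List.countP_eq_zero.mpr
      intro j _
      rw [hlay j]
      cases g j <;> simp
    rw [hz]; simp

-- B's chain over one residue class, processed prefix of length c (indices r, r+v, …)
def gOfB (reach : List Bool) : Nat → Bool := fun j => reach.getD j false

def BSt (reach : List Bool) (a : Int) (v r : Nat) (nxt : List Bool) (c : Nat) :
    List Bool × Int :=
  ((List.range c).map (fun k : Nat => ((r : Int) + (v : Int) * (k : Int)))).foldl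
    (stepBL reach a) (nxt, a + 1)

theorem BSt_succ (reach : List Bool) (a : Int) (v r : Nat) (nxt : List Bool) (c : Nat) :
    BSt reach a v r nxt (c + 1)
      = stepBL reach a (BSt reach a v r nxt c) ((r : Int) + (v : Int) * (c : Int)) := by
  unfold BSt; rw [List.range_succ, List.map_append, List.foldl_append]; rfl

theorem passB (reach : List Bool) (v : Nat) (a : Int) (hv : 1 ≤ v) (ha : 1 ≤ a)
    (r : Nat) (hr : r < v) (nxt : List Bool) :
    ∀ (c : Nat), (∀ k, k < c → r + v * k < nxt.length) →
    (BSt reach a v r nxt c).1.length = nxt.length ∧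
    (∀ x : Nat, (BSt reach a v r nxt c).1.getD x false =
      if ∃ k, k < c ∧ x = r + v * k then nrF (gOfB reach) v a x else nxt.getD x false) ∧
    (match c with
     | 0 => (BSt reach a v r nxt c).2 = a + 1
     | c' + 1 =>
        (∀ k : Nat, gapF (gOfB reach) v (r + v * c') = some k
          → (BSt reach a v r nxt c).2 = (k : Int)) ∧
        (gapF (gOfB reach) v (r + v * c') = none → a < (BSt reach a v r nxt c).2)) := by
  intro c
  induction c with
  | zero =>
    intro _
    refine ⟨rfl, ?_, rfl⟩
    intro x
    rw [if_neg (by rintro ⟨k, hk, _⟩; omega)]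
    rfl
  | succ c ihc =>
    intro hbound
    obtain ⟨hL, hpt, hgap⟩ := ihc (fun k hk => hbound k (by omega))
    have hj : ((r : Int) + (v : Int) * (c : Int)) = ((r + v * c : Nat) : Int) := by
      push_cast; ring
    have hread : PySem.List.pyGetD reach ((r : Int) + (v : Int) * (c : Int)) false
        = gOfB reach (r + v * c) := by
      rw [hj, PySem.List.pyGetD_natCast]; rfl
    have hjlen : r + v * c < (BSt reach a v r nxt c).1.length := by
      rw [hL]; exact hbound c (by omega)
    rw [BSt_succ]
    unfold stepBL
    rw [hread]
    -- characterise the gap value written and the bit written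
    have hmain : ∀ gap' : Int,
        gap' = (if gOfB reach (r + v * c) then (0 : Int) else (BSt reach a v r nxt c).2 + 1) →
        (decide (gap' ≤ a) = nrF (gOfB reach) v a (r + v * c)) ∧
        (∀ k : Nat, gapF (gOfB reach) v (r + v * c) = some k → gap' = (k : Int)) ∧
        (gapF (gOfB reach) v (r + v * c) = none → a < gap') := by
      intro gap' hdef
      cases hgj : gOfB reach (r + v * c) with
      | true =>
        have hgapj : gapF (gOfB reach) v (r + v * c) = some 0 := by
          rw [gapF]; simp [hgj]
        rw [hgj] at hdef
        simp only [if_true] at hdef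
        subst hdef
        refine ⟨?_, ?_, ?_⟩
        · rw [nrF_of_g _ _ _ ha _ hgj]; simp; omega
        · intro k hk; rw [hgapj] at hk; injection hk with hk; subst hk; rfl
        · intro hk; rw [hgapj] at hk; cases hk
      | false =>
        rw [hgj] at hdef
        simp only [Bool.false_eq_true, if_false] at hdef
        cases c with
        | zero =>
          have hgapj : gapF (gOfB reach) v (r + v * 0) = none := by
            rw [gapF_of_lt _ _ _ (by omega)]
            rw [show r + v * 0 = r from by omega] at hgj ⊢
            rw [hgj]
            rfl
          have hst2 : (BSt reach a v r nxt 0).2 = a + 1 := hgap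
          rw [hst2] at hdef
          refine ⟨?_, ?_, ?_⟩
          · have : nrF (gOfB reach) v a (r + v * 0) = false := by
              unfold nrF; rw [hgapj]
            rw [this, hdef]; simp
          · intro k hk; rw [hgapj] at hk; cases hk
          · intro _; omega
        | succ c' =>
          have hsub : r + v * (c' + 1) - v = r + v * c' := by
            have : v * (c' + 1) = v * c' + v := by ring
            omega
          have hgapj : gapF (gOfB reach) v (r + v * (c' + 1))
              = (gapF (gOfB reach) v (r + v * c')).map (· + 1) := by
            rw [gapF]
            simp only [hgj, Bool.false_eq_true, if_false]
            rw [dif_neg (by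
              have : v * (c' + 1) = v * c' + v := by ring
              omega)]
            rw [hsub]
          cases hpre : gapF (gOfB reach) v (r + v * c') with
          | some k =>
            have hst2 : (BSt reach a v r nxt (c' + 1)).2 = (k : Int) := hgap.1 k hpre
            rw [hst2] at hdef
            refine ⟨?_, ?_, ?_⟩
            · unfold nrF; rw [hgapj, hpre]
              simp only [Option.map_some]
              rw [hdef]
              simp
            · intro k' hk'
              rw [hgapj, hpre] at hk'
              simp only [Option.map_some, Option.some.injEq] at hk'
              rw [hdef, ← hk']
              push_cast; ring
            · intro hk'; rw [hgapj, hpre] at hk'; simp at hk'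
          | none =>
            have hst2 : a < (BSt reach a v r nxt (c' + 1)).2 := hgap.2 hpre
            refine ⟨?_, ?_, ?_⟩
            · have : nrF (gOfB reach) v a (r + v * (c' + 1)) = false := by
                unfold nrF; rw [hgapj, hpre]; rfl
              rw [this, hdef]
              simp; omega
            · intro k' hk'; rw [hgapj, hpre] at hk'; simp at hk'
            · intro _; rw [hdef]; omega
    obtain ⟨hbit, hsome, hnone⟩ := hmain _ rfl
    have hset : PySem.List.pySetD (BSt reach a v r nxt c).1
          ((r : Int) + (v : Int) * (c : Int))
          (decide ((if gOfB reach (r + v * c) = true then (0 : Int)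
              else (BSt reach a v r nxt c).2 + 1) ≤ a))
        = (BSt reach a v r nxt c).1.set (r + v * c)
            (nrF (gOfB reach) v a (r + v * c)) := by
      rw [hj, PySem.List.pySetD_natCast, hbit]
    refine ⟨?_, ?_, ?_⟩
    · simp only [hset]
      simp [hL]
    · intro x
      simp only [hset]
      rw [getD_set' _ _ _ _ _ hjlen]
      by_cases hx : x = r + v * c
      · subst hx
        rw [if_pos rfl, if_pos ⟨c, by omega, rfl⟩]
      · rw [if_neg hx, hpt x]
        by_cases hex : ∃ k, k < c ∧ x = r + v * k
        · rw [if_pos hex]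
          obtain ⟨k, hk, rfl⟩ := hex
          rw [if_pos ⟨k, by omega, rfl⟩]
        · rw [if_neg hex, if_neg ?_]
          rintro ⟨k, hk, rfl⟩
          rcases Nat.lt_succ_iff_lt_or_eq.mp hk with hk' | hk'
          · exact hex ⟨k, hk', rfl⟩
          · subst hk'; exact hx rfl
    · exact ⟨hsome, hnone⟩

-- which indices a residue-r chain visits
theorem chain_cover (v : Nat) (hv : 1 ≤ v) (N r : Nat) (hr : r < N) :
    PySem.List.pyRange (r : Int) (N : Int) (v : Int)
      = (List.range ((((N : Int) - r + v - 1) / v).toNat)).map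
          (fun k : Nat => (r : Int) + (v : Int) * (k : Int))
    ∧ (∀ x : Nat, (∃ k, k < (((N : Int) - r + v - 1) / v).toNat ∧ x = r + v * k)
        ↔ (r ≤ x ∧ x < N ∧ v ∣ x - r)) := by
  have hv0 : (0 : Int) < (v : Int) := by exact_mod_cast hv
  have h1 : PySem.List.pyRange (r : Int) (N : Int) (v : Int)
      = (List.range ((((N : Int) - r + v - 1) / v).toNat)).map
          (fun k : Nat => (r : Int) + (v : Int) * (k : Int)) := by
    rw [PySem.List.pyRange_of_pos _ _ hv0, if_pos (by exact_mod_cast hr)]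
  refine ⟨h1, ?_⟩
  intro x
  constructor
  · rintro ⟨k, hk, rfl⟩
    have hmem : ((r : Int) + (v : Int) * (k : Int)) ∈
        PySem.List.pyRange (r : Int) (N : Int) (v : Int) := by
      rw [h1]
      exact List.mem_map.mpr ⟨k, List.mem_range.mpr hk, rfl⟩
    have := (PySem.List.mem_pyRange_iff_of_pos hv0 _).mp hmem
    refine ⟨by omega, ?_, k, by omega⟩
    have h2 := this.2.1
    have : ((r + v * k : Nat) : Int) = (r : Int) + (v : Int) * (k : Int) := by push_cast; ring
    omega
  · rintro ⟨hle, hlt, k, hk⟩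
    have hx : x = r + v * k := by omega
    subst hx
    have hmem : ((r : Int) + (v : Int) * (k : Int)) ∈
        PySem.List.pyRange (r : Int) (N : Int) (v : Int) := by
      apply (PySem.List.mem_pyRange_iff_of_pos hv0 _).mpr
      refine ⟨by omega, ?_, ?_⟩
      · have : ((r + v * k : Nat) : Int) = (r : Int) + (v : Int) * (k : Int) := by
          push_cast; ring
        omega
      · have : (r : Int) + (v : Int) * (k : Int) - r = (v : Int) * k := by ring
        rw [this]
        exact dvd_mul_right _ _
    rw [h1] at hmem
    obtain ⟨k', hk', he⟩ := List.mem_map.mp hmem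
    have hkk : k' = k := by
      have h2 : (v : Int) * (k' : Int) = (v : Int) * (k : Int) := by omega
      have h3 : (k' : Int) = (k : Int) :=
        mul_left_cancel₀ (by omega : (v : Int) ≠ 0) h2
      exact_mod_cast h3
    exact ⟨k, by rw [← hkk]; exact List.mem_range.mp hk', rfl⟩

-- B's per-coin result
-- B's per-coin result
theorem coinBL_char (N : Nat) (hN : 1 ≤ N) (n : Int) (hn : (N : Int) = n + 1)
    (va : Int × Int) (reach : List Bool) (hlen : reach.length = N)
    (g : Nat → Bool) (hg : ∀ j, j < N → reach.getD j false = g j) :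
    (coinBL n reach va).length = N ∧
    (∀ j, j < N → (coinBL n reach va).getD j false = layerG g va.1 va.2 j) := by
  have hgB : ∀ j, j < N → gOfB reach j = g j := fun j hj => hg j hj
  by_cases hva : va.1 ≤ 0 ∨ va.2 ≤ 0
  · -- skipped coin
    have hlay : ∀ j, layerG g va.1 va.2 j = g j := by
      intro j; unfold layerG; rw [if_neg (by omega)]
    unfold coinBL
    rw [if_pos hva]
    exact ⟨hlen, fun j hj => by rw [hlay j]; exact hg j hj⟩
  · have hv1 : 1 ≤ va.1 := by omega
    have ha1 : 1 ≤ va.2 := by omega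
    have hlay : ∀ j, layerG g va.1 va.2 j = nrF g va.1.toNat va.2 j := by
      intro j; unfold layerG; rw [if_pos ⟨hv1, ha1⟩]
    have hvN1 : 1 ≤ va.1.toNat := by omega
    set R := min va.1.toNat N with hR
    have hmin : min va.1 (n + 1) = ((R : Nat) : Int) := by
      simp only [hR]
      rcases le_total va.1 (n + 1) with h | h
      · rw [min_eq_left h, min_eq_left (by omega)]; omega
      · rw [min_eq_right h, min_eq_right (by omega)]; omega
    -- the residue fold, by induction over the number of residues still to process
    have hstep : ∀ (ρ : Nat) (res : List Bool), ρ < R → res.length = N →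
        (resBL n reach va.1 va.2 res (ρ : Int)).length = N ∧
        (∀ x : Nat, (resBL n reach va.1 va.2 res (ρ : Int)).getD x false
          = if ρ ≤ x ∧ x < N ∧ va.1.toNat ∣ x - ρ then nrF (gOfB reach) va.1.toNat va.2 x
            else res.getD x false) := by
      intro ρ res hρ hreslen
      have hρN : ρ < N := by omega
      have hρv : ρ < va.1.toNat := by omega
      have hcov := chain_cover va.1.toNat hvN1 N ρ hρN
      have hca : ((va.1.toNat : Nat) : Int) = va.1 := by omega
      have hrw : PySem.List.pyRange (ρ : Int) (n + 1) va.1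
          = (List.range ((((N : Int) - ρ + va.1.toNat - 1) / va.1.toNat).toNat)).map
              (fun k : Nat => ((ρ : Int) + ((va.1.toNat : Nat) : Int) * (k : Int))) := by
        rw [show (n + 1) = ((N : Nat) : Int) by omega, show va.1 = ((va.1.toNat : Nat) : Int) by omega]
        exact hcov.1
      have hpb := passB reach va.1.toNat va.2 hvN1 ha1 ρ hρv res
        ((((N : Int) - ρ + va.1.toNat - 1) / va.1.toNat).toNat)
        (by
          intro k hk
          have := (hcov.2 (ρ + va.1.toNat * k)).mp ⟨k, hk, rfl⟩
          omega)
      have hres' : resBL n reach va.1 va.2 res (ρ : Int)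
          = (BSt reach va.2 va.1.toNat ρ res
              ((((N : Int) - ρ + va.1.toNat - 1) / va.1.toNat).toNat)).1 := by
        unfold resBL BSt
        rw [hrw]
      rw [hres']
      refine ⟨by rw [hpb.1, hreslen], ?_⟩
      intro x
      rw [hpb.2.1 x]
      by_cases hex : ∃ k, k < (((N : Int) - ρ + va.1.toNat - 1) / va.1.toNat).toNat ∧
          x = ρ + va.1.toNat * k
      · rw [if_pos hex, if_pos ((hcov.2 x).mp hex)]
      · rw [if_neg hex, if_neg (fun hc => hex ((hcov.2 x).mpr hc))]
    have hres : ∀ (m ρ : Nat), ρ + m = R →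
        ∀ (res : List Bool), res.length = N →
        (∀ x : Nat, res.getD x false
          = if x < N ∧ x % va.1.toNat < ρ then nrF (gOfB reach) va.1.toNat va.2 x else false) →
        (((List.range m).map (fun k : Nat => ((ρ + k : Nat) : Int))).foldl
            (resBL n reach va.1 va.2) res).length = N ∧
        (∀ x : Nat, (((List.range m).map (fun k : Nat => ((ρ + k : Nat) : Int))).foldl
            (resBL n reach va.1 va.2) res).getD x false
          = if x < N ∧ x % va.1.toNat < R then nrF (gOfB reach) va.1.toNat va.2 x else false) := by
      intro m
      induction m with
      | zero =>
        intro ρ hρ res hrl hri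
        have : ρ = R := by omega
        subst this
        simp only [List.range_zero, List.map_nil, List.foldl_nil]
        exact ⟨hrl, fun x => by rw [hri x]⟩
      | succ m ihm =>
        intro ρ hρ res hrl hri
        rw [List.range_succ_eq_map, List.map_cons, List.foldl_cons, List.map_map]
        have hstep' := hstep ρ res (by omega) hrl
        have hlist : (List.range m).map
              ((fun k : Nat => ((ρ + k : Nat) : Int)) ∘ Nat.succ)
            = (List.range m).map (fun k : Nat => (((ρ + 1) + k : Nat) : Int)) := by
          apply List.map_congr_left
          intro k _
          simp only [Function.comp]
          congr 1
          omega
        rw [show ((ρ + 0 : Nat) : Int) = (ρ : Int) by omega] at *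
        rw [hlist]
        apply ihm (ρ + 1) (by omega) _ hstep'.1
        intro x
        rw [hstep'.2 x]
        by_cases hxN : x < N
        · by_cases hxm : x % va.1.toNat = ρ
          · have hdvd : va.1.toNat ∣ x - ρ := by
              have hmd := Nat.mod_add_div x va.1.toNat
              exact ⟨x / va.1.toNat, by omega⟩
            have hle : ρ ≤ x := by
              have := Nat.mod_le x va.1.toNat
              omega
            rw [if_pos ⟨hle, hxN, hdvd⟩, if_pos ⟨hxN, by omega⟩]
          · have hnc : ¬ (ρ ≤ x ∧ x < N ∧ va.1.toNat ∣ x - ρ) := by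
              rintro ⟨hle, -, k, hk⟩
              have hx : x = ρ + va.1.toNat * k := by omega
              rw [hx, Nat.add_mul_mod_self_left, Nat.mod_eq_of_lt (by omega)] at hxm
              exact hxm rfl
            rw [if_neg hnc, hri x]
            by_cases hlt : x % va.1.toNat < ρ
            · rw [if_pos ⟨hxN, hlt⟩, if_pos ⟨hxN, by omega⟩]
            · rw [if_neg (by tauto), if_neg (by rintro ⟨-, h⟩; omega)]
        · rw [if_neg (by tauto), hri x, if_neg (by tauto), if_neg (by tauto)]
    -- assemble
    have hrep : (List.replicate (n + 1).toNat false).length = N := by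
      simp; omega
    have hrepinv : ∀ x : Nat, (List.replicate (n + 1).toNat false).getD x false
        = if x < N ∧ x % va.1.toNat < 0 then nrF (gOfB reach) va.1.toNat va.2 x else false := by
      intro x
      rw [getD_replicate, if_neg (by omega)]
    have hfin := hres R 0 (by omega) _ hrep hrepinv
    have hcb : coinBL n reach va
        = ((List.range R).map (fun k : Nat => ((0 + k : Nat) : Int))).foldl
            (resBL n reach va.1 va.2) (List.replicate (n + 1).toNat false) := by
      unfold coinBL
      rw [if_neg (by omega), hmin, PySem.List.pyRange_zero_nat]
      congr 1
      apply List.map_congr_left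
      intro k _
      congr 1
      omega
    rw [hcb]
    refine ⟨hfin.1, ?_⟩
    intro j hj
    rw [hfin.2 j]
    have hjR : j % va.1.toNat < R := by
      have h1 : j % va.1.toNat < va.1.toNat := Nat.mod_lt _ (by omega)
      have h2 : j % va.1.toNat ≤ j := Nat.mod_le _ _
      omega
    rw [if_pos ⟨hj, hjR⟩, hlay j]
    exact nrF_congr _ _ _ _ _ (fun x hx => hgB x (by omega))

-- monotonicity of a layer
theorem layerG_mono (g : Nat → Bool) (v a : Int) (j : Nat) (hj : g j = true) :
    layerG g v a j = true := by
  unfold layerG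
  by_cases h : 1 ≤ v ∧ 1 ≤ a
  · simp only [h, and_self, if_true]; exact nrF_of_g g v.toNat a h.2 j hj
  · simp [h, hj]

theorem layersG_zero (pairs : List (Int × Int)) (g : Nat → Bool) (hg : g 0 = true) :
    layersG g pairs 0 = true := by
  induction pairs generalizing g with
  | nil => exact hg
  | cons p ps ih => exact ih _ (layerG_mono g p.1 p.2 0 hg)

-- A's outer loop over the coin pairs
theorem outerA (N : Nat) (hN : 1 ≤ N) (n : Int) (hn : (N : Int) = n + 1)
    (pairs : List (Int × Int)) (hvals : ∀ p ∈ pairs, 0 ≤ p.1) :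
    ∀ (dp : List Int) (ret : Int) (g : Nat → Bool), dp.length = N →
    (∀ j, j < N → dp.getD j 0 = if g j then 1 else 0) →
    (pairs.foldl (fun (st : List Int × Int) p => coinPL n st p.1 p.2) (dp, ret)).2
      = ret + ((List.range N).countP (layersG g pairs) : Int)
          - ((List.range N).countP g : Int) := by
  induction pairs with
  | nil =>
    intro dp ret g _ _
    simp [layersG]
  | cons p ps ih =>
    intro dp ret g hl hg
    have hco := coinA_char N hN n hn p.1 p.2 (hvals p (by simp)) dp ret hl g hg
    have hfold : ((p :: ps).foldl (fun (st : List Int × Int) p => coinPL n st p.1 p.2) (dp, ret))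
        = ps.foldl (fun (st : List Int × Int) p => coinPL n st p.1 p.2)
            ((coinPL n (dp, ret) p.1 p.2).1, (coinPL n (dp, ret) p.1 p.2).2) := by
      simp
    rw [hfold]
    have hih := ih (fun q hq => hvals q (by simp [hq]))
      (coinPL n (dp, ret) p.1 p.2).1 (coinPL n (dp, ret) p.1 p.2).2 (layerG g p.1 p.2)
      hco.1 hco.2.1
    rw [hih, hco.2.2]
    have hsplit : (List.range N).countP (layerG g p.1 p.2)
        = (List.range N).countP g
          + (List.range N).countP (fun j => layerG g p.1 p.2 j && ! g j) :=
      countP_split _ _ _ (fun x _ hx => layerG_mono g p.1 p.2 x hx)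
    have hlay : layersG g (p :: ps) = layersG (layerG g p.1 p.2) ps := rfl
    rw [hlay]
    omega

-- the indexed outer loop of A equals a fold over the zipped pairs
theorem foldl_idx_zip {σ : Type} (f : σ → Int → Int → σ) :
    ∀ (value amount : List Int) (init : σ), value.length ≤ amount.length →
    (PySem.List.pyRange 0 (value.length : Int) 1).foldl
      (fun st i => f st (PySem.List.pyGetD value i 0) (PySem.List.pyGetD amount i 0)) init
    = (value.zip amount).foldl (fun st p => f st p.1 p.2) init := by
  intro value
  induction value with
  | nil =>
    intro amount init _
    rw [show ((List.length ([] : List Int)) : Int) = 0 from rfl,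
       PySem.List.pyRange_one_eq_nil le_rfl]
    simp
  | cons x vs ih =>
    intro amount init h
    cases amount with
    | nil => simp at h
    | cons y as =>
      have has : vs.length ≤ as.length := by simpa using h
      rw [PySem.List.pyRange_zero_nat,
        show (x :: vs).length = vs.length + 1 from rfl, List.range_succ_eq_map]
      simp only [List.map_cons, List.foldl_cons, List.map_map]
      rw [List.foldl_map]
      have h0 : f init (PySem.List.pyGetD (x :: vs) ((0 : Nat) : Int) 0)
            (PySem.List.pyGetD (y :: as) ((0 : Nat) : Int) 0) = f init x y := by
        rw [PySem.List.pyGetD_natCast, PySem.List.pyGetD_natCast]; rfl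
      rw [h0]
      have hbody := PySem.List.foldl_congr_mem (List.range vs.length)
        (fun st (k : Nat) => f st
          (PySem.List.pyGetD (x :: vs) (((fun k : Nat => (k : Int)) ∘ Nat.succ) k) 0)
          (PySem.List.pyGetD (y :: as) (((fun k : Nat => (k : Int)) ∘ Nat.succ) k) 0))
        (fun st (k : Nat) => f st
          (PySem.List.pyGetD vs (k : Int) 0) (PySem.List.pyGetD as (k : Int) 0))
        (f init x y)
        (by
          intro acc k _
          dsimp only
          have e1 : (((fun k : Nat => (k : Int)) ∘ Nat.succ) k) = ((k + 1 : Nat) : Int) := rfl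
          rw [e1, PySem.List.pyGetD_natCast, PySem.List.pyGetD_natCast,
            PySem.List.pyGetD_natCast, PySem.List.pyGetD_natCast]
          rfl)
      rw [hbody]
      have hih := ih as (f init x y) has
      rw [PySem.List.pyRange_zero_nat, List.foldl_map] at hih
      rw [hih]
      rfl

-- B's outer loop
theorem outerB (N : Nat) (hN : 1 ≤ N) (n : Int) (hn : (N : Int) = n + 1)
    (pairs : List (Int × Int)) :
    ∀ (reach : List Bool) (g : Nat → Bool), reach.length = N →
    (∀ j, j < N → reach.getD j false = g j) →
    (pairs.foldl (coinBL n) reach).length = N ∧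
    (∀ j, j < N → (pairs.foldl (coinBL n) reach).getD j false = layersG g pairs j) := by
  induction pairs with
  | nil => intro reach g hl hg; exact ⟨hl, hg⟩
  | cons p ps ih =>
    intro reach g hl hg
    have h1 := coinBL_char N hN n hn p reach hl g hg
    exact ih (coinBL n reach p) (layerG g p.1 p.2) h1.1 h1.2

-- final counting helpers
theorem count_range_shift (p : Nat → Bool) (M : Nat) :
    (List.range (M + 1)).countP p
      = (if p 0 then 1 else 0) + (List.range M).countP (fun j => p (j + 1)) := by
  rw [List.range_succ_eq_map, List.countP_cons, List.countP_map]
  have : (p ∘ Nat.succ) = (fun j => p (j + 1)) := rfl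
  rw [this]
  by_cases h0 : p 0
  · simp [h0]
    omega
  · simp [h0]


theorem foldl_bool_sum (l : List Bool) :
    l.foldl (fun s b => s + if b then (1 : Int) else 0) 0 = (l.countP id : Int) := by
  have hfe : (fun (s : Int) (b : Bool) => s + if b then (1 : Int) else 0)
      = (fun (s : Int) (b : Bool) => if id b = true then s + 1 else s) := by
    funext s b; cases b <;> simp
  rw [hfe, PySem.List.foldl_count_if id l 0]
  simp

theorem backPackVIII_eval (n : Int) (value amount : List Int)
    (hn0 : 0 ≤ n) (hvals : ∀ v ∈ value, 0 ≤ v) (hlen : value.length ≤ amount.length) :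
    backPackVIII n value amount
      = ((List.range (n + 1).toNat).countP
          (layersG (fun j : Nat => j == 0) (value.zip amount)) : Int)
        - ((List.range (n + 1).toNat).countP (fun j : Nat => j == 0) : Int) := by
  have hN : 1 ≤ (n + 1).toNat := by omega
  have hn : (((n + 1).toNat : Nat) : Int) = n + 1 := by omega
  have hdp0 : PySem.List.pySetD (List.replicate (n + 1).toNat (0 : Int)) 0 1
      = (List.replicate (n + 1).toNat (0 : Int)).set 0 1 := by
    rw [PySem.List.pySetD_of_nonneg _ _ le_rfl]; rfl
  have hdplen : ((List.replicate (n + 1).toNat (0 : Int)).set 0 1).length = (n + 1).toNat := by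
    simp
  have hdpinv : ∀ j, j < (n + 1).toNat →
      ((List.replicate (n + 1).toNat (0 : Int)).set 0 1).getD j 0
        = if (j == 0 : Bool) then 1 else 0 := by
    intro j hj
    rw [getD_set' _ _ _ _ _ (by simp; omega)]
    by_cases hj0 : j = 0
    · simp [hj0]
    · rw [if_neg hj0, getD_replicate]
      simp [hj0]
  have hzip := foldl_idx_zip (fun (st : List Int × Int) vi ai => coinPL n st vi ai)
    value amount ((List.replicate (n + 1).toNat (0 : Int)).set 0 1, 0) hlen
  have houter := outerA (n + 1).toNat hN n hn (value.zip amount)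
    (fun p hp => hvals p.1 (List.of_mem_zip hp).1)
    ((List.replicate (n + 1).toNat (0 : Int)).set 0 1) 0 (fun j : Nat => j == 0)
    hdplen hdpinv
  have hbr := outerA_bridge n value amount (PySem.List.pyRange 0 (value.length : Int) 1)
    (aSet (List.replicate (n + 1).toNat (0 : Int)).toArray 0 1, 0)
  have haset : (aSet (List.replicate (n + 1).toNat (0 : Int)).toArray 0 1).toList
      = PySem.List.pySetD (List.replicate (n + 1).toNat (0 : Int)) 0 1 := by
    rw [aSet_toList, List.toList_toArray]
  show ((PySem.List.pyRange 0 (value.length : Int) 1).foldl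
      (fun st i => coinP n st (PySem.List.pyGetD value i 0) (PySem.List.pyGetD amount i 0))
      (aSet (List.replicate (n + 1).toNat (0 : Int)).toArray 0 1, 0)).2 = _
  rw [congrArg Prod.snd hbr]
  dsimp only
  rw [haset, hdp0, hzip, houter]
  omega

theorem backPackVIII_alt_eval (n : Int) (value amount : List Int) (hn0 : 0 ≤ n) :
    backPackVIII_alt n value amount
      = (((List.range (n + 1).toNat).map
            (layersG (fun j : Nat => j == 0) (value.zip amount))).drop 1).countP id := by
  have hN : 1 ≤ (n + 1).toNat := by omega
  have hn : (((n + 1).toNat : Nat) : Int) = n + 1 := by omega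
  have hr0 : PySem.List.pySetD (List.replicate (n + 1).toNat false) 0 true
      = (List.replicate (n + 1).toNat false).set 0 true := by
    rw [PySem.List.pySetD_of_nonneg _ _ le_rfl]; rfl
  have hrlen : ((List.replicate (n + 1).toNat false).set 0 true).length = (n + 1).toNat := by
    simp
  have hrinv : ∀ j, j < (n + 1).toNat →
      ((List.replicate (n + 1).toNat false).set 0 true).getD j false = (j == 0 : Bool) := by
    intro j hj
    rw [getD_set' _ _ _ _ _ (by simp; omega)]
    by_cases hj0 : j = 0
    · simp [hj0]
    · rw [if_neg hj0, getD_replicate]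
      simp [hj0]
  have hB := outerB (n + 1).toNat hN n hn (value.zip amount)
    ((List.replicate (n + 1).toNat false).set 0 true) (fun j : Nat => j == 0) hrlen hrinv
  have hfin : (value.zip amount).foldl (coinBL n)
        ((List.replicate (n + 1).toNat false).set 0 true)
      = (List.range (n + 1).toNat).map
          (layersG (fun j : Nat => j == 0) (value.zip amount)) :=
    eq_map_range _ false _ _ hB.1 hB.2
  have hbr := zipB_bridge n (value.zip amount)
    (aSet (List.replicate (n + 1).toNat false).toArray 0 true)
  have haset : (aSet (List.replicate (n + 1).toNat false).toArray 0 true).toList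
      = PySem.List.pySetD (List.replicate (n + 1).toNat false) 0 true := by
    rw [aSet_toList, List.toList_toArray]
  show (PySem.List.slice ((value.zip amount).foldl (coinB n)
      (aSet (List.replicate (n + 1).toNat false).toArray 0 true)).toList (some 1) none).foldl
      (fun s b => s + (if b then (1 : Int) else 0)) 0 = _
  rw [hbr, haset, hr0, hfin, PySem.List.slice_from _ (by omega : (0 : Int) ≤ 1), foldl_bool_sum]
  rfl

-- ===== VERDICT (by name: the statement is the Claim_ definition above) =====
theorem backPackVIII_spec : Claim_equal_backPackVIII := by
  intro n value amount _ hpre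
  obtain ⟨hn0, hvals, hlen⟩ := hpre
  unfold Spec_backPackVIII
  rw [backPackVIII_eval n value amount hn0 hvals hlen, backPackVIII_alt_eval n value amount hn0]
  obtain ⟨M, hM⟩ : ∃ M, (n + 1).toNat = M + 1 := ⟨(n + 1).toNat - 1, by omega⟩
  rw [hM]
  set G := layersG (fun j : Nat => j == 0) (value.zip amount) with hG
  have hG0 : G 0 = true := layersG_zero _ _ rfl
  have hdrop : ((List.range (M + 1)).map G).drop 1 = (List.range M).map (G ∘ Nat.succ) := by
    rw [List.range_succ_eq_map, List.map_cons, List.map_map]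
    rfl
  rw [hdrop, List.countP_map]
  rw [count_range_shift G M, count_range_shift (fun j : Nat => j == 0) M, hG0]
  have hz : (List.range M).countP (fun j => ((j + 1 : Nat) == 0 : Bool)) = 0 := by
    apply List.countP_eq_zero.mpr
    intro j _
    simp
  rw [hz]
  have : (List.countP (id ∘ (G ∘ Nat.succ)) (List.range M))
      = (List.countP (fun j => G (j + 1)) (List.range M)) := rfl
  rw [this]
  norm_num
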